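-- pv_equiv track=rewrite | github.com/Vladosik02/TelegramBotClock | keyboards/kb.py | calc_blocked_end_times
-- ===== SOURCE A (Python) =====
-- _BDAY_TIMES = [
--     ("☀️ 13:00", "13:00"), ("☀️ 14:00", "14:00"), ("☀️ 15:00", "15:00"), ("☀️ 16:00", "16:00"),
--     ("☀️ 17:00", "17:00"), ("🌙 18:00", "18:00"), ("🌙 19:00", "19:00"), ("🌙 20:00", "20:00"),
--     ("🌙 21:00", "21:00"), ("🌙 22:00", "22:00"), ("🌙 23:00", "23:00"),
-- ]
--
-- def calc_blocked_end_times(start_min: int, blocks: list[tuple[int, int]], cleanup: int) -> set[str]: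
--     """Return set of time strings that would cause the new birthday [start_min, e+cleanup)
--     to overlap an existing block. Used to filter the end-time picker.
--     """
--     skip: set[str] = set()
--     for _, value in _BDAY_TIMES:
--         h, m = int(value[:2]), int(value[3:])
--         e_min = h * 60 + m
--         for b_s, b_e in blocks:
--             if start_min < b_e and b_s < e_min + cleanup:
--                 skip.add(value)
--                 break
--     return skip
-- ===== SOURCE B (Python) =====
-- _BDAY_TIMES = [
--     ("☀️ 13:00", "13:00"), ("☀️ 14:00", "14:00"), ("☀️ 15:00", "15:00"), ("☀️ 16:00", "16:00"),
--     ("☀️ 17:00", "17:00"), ("🌙 18:00", "18:00"), ("🌙 19:00", "19:00"), ("🌙 20:00", "20:00"),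
--     ("🌙 21:00", "21:00"), ("🌙 22:00", "22:00"), ("🌙 23:00", "23:00"),
-- ]
--
--
-- def calc_blocked_end_times(start_min: int, blocks: list[tuple[int, int]], cleanup: int) -> set[str]:
--     # One pass over blocks: smallest start among blocks the new booking could reach.
--     threshold = None
--     for b_s, b_e in blocks:
--         if start_min < b_e and (threshold is None or b_s < threshold):
--             threshold = b_s
--     return {value for _, value in _BDAY_TIMES
--             if threshold is not None
--             and threshold < int(value[:2]) * 60 + int(value[3:]) + cleanup}
-- ===== Notes on version B (the rewrite author's own statement) =====
-- stated objective: alternative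
-- what changed: Replaces the nested per-time scan of all blocks with a single pass computing the minimal qualifying block start, then a constant-size filter over the 11 fixed times.
import Mathlib
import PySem

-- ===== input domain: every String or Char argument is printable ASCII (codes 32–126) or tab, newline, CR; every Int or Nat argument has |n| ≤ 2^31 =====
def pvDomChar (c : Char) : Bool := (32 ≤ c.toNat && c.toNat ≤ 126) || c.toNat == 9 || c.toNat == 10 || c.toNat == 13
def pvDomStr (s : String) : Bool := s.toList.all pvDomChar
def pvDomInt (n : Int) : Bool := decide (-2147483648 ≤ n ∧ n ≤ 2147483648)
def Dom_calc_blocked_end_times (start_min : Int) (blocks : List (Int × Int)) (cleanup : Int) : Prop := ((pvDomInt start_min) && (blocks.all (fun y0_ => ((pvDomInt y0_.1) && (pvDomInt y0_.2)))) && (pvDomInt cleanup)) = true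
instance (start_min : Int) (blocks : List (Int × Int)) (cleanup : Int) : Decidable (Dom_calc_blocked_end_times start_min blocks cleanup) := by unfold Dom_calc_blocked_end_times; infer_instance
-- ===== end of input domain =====

-- B replaces A's per-time scan of all blocks by one pass over blocks (minimal qualifying
-- block start) followed by a constant-size filter of the 11 fixed times: fewer scans of blocks.
-- Python returns a set[str]; both ports build its distinct elements in _BDAY_TIMES order.

-- ===== PORT A =====
def pvBdayTimes : List (String × String) :=
  [("☀️ 13:00", "13:00"), ("☀️ 14:00", "14:00"), ("☀️ 15:00", "15:00"), ("☀️ 16:00", "16:00"),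
   ("☀️ 17:00", "17:00"), ("🌙 18:00", "18:00"), ("🌙 19:00", "19:00"), ("🌙 20:00", "20:00"),
   ("🌙 21:00", "21:00"), ("🌙 22:00", "22:00"), ("🌙 23:00", "23:00")]

-- e_min = int(value[:2]) * 60 + int(value[3:]); int() never fails on the fixed "HH:MM"
-- strings of _BDAY_TIMES, so the getD 0 default is never taken.
def pvEMin (value : String) : Int :=
  (PySem.Int.ofStr? (PySem.Str.slice value none (some 2))).getD 0 * 60 +
    (PySem.Int.ofStr? (PySem.Str.slice value (some 3) none)).getD 0

-- inner 'for b_s, b_e in blocks: if …: skip.add(value); break'  =  any + conditional add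
def calc_blocked_end_times (start_min : Int) (blocks : List (Int × Int)) (cleanup : Int) : List String :=
  pvBdayTimes.foldl
    (fun skip p =>
      let e_min := pvEMin p.2
      if blocks.any (fun b => decide (start_min < b.2) && decide (b.1 < e_min + cleanup)) then
        PySem.Set.add skip p.2
      else skip)
    PySem.Set.empty

-- ===== PORT B =====
-- 'threshold is None or b_s < threshold' as an Option Int test
def pvThLt (th : Option Int) (c : Int) : Bool :=
  match th with
  | none => false
  | some t => decide (t < c)

def pvThStep (start_min : Int) (th : Option Int) (b : Int × Int) : Option Int :=
  if decide (start_min < b.2) && (match th with | none => true | some t => decide (b.1 < t)) then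
    some b.1
  else th

def calc_blocked_end_times_alt (start_min : Int) (blocks : List (Int × Int)) (cleanup : Int) : List String :=
  let threshold := blocks.foldl (pvThStep start_min) none
  PySem.Set.ofList
    ((pvBdayTimes.filter (fun p => pvThLt threshold (pvEMin p.2 + cleanup))).map (·.2))

-- ===== PRECONDITION & SPEC =====
def Spec_calc_blocked_end_times (start_min : Int) (blocks : List (Int × Int)) (cleanup : Int) (out : List String) : Prop := out = calc_blocked_end_times_alt start_min blocks cleanup
instance (start_min : Int) (blocks : List (Int × Int)) (cleanup : Int) (out : List String) : Decidable (Spec_calc_blocked_end_times start_min blocks cleanup out) := by unfold Spec_calc_blocked_end_times; infer_instance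

-- ===== CLAIM (what is proved, stated in full; the proofs are below) =====
def Claim_equal_calc_blocked_end_times : Prop := ∀ (start_min : Int) (blocks : List (Int × Int)) (cleanup : Int), Dom_calc_blocked_end_times start_min blocks cleanup → Spec_calc_blocked_end_times start_min blocks cleanup (calc_blocked_end_times start_min blocks cleanup)

-- ===== LEMMAS AND PROOFS =====

-- A's inner any-scan equals the threshold test, generalized over the fold accumulator.
lemma any_eq_thLt (start_min c : Int) (blocks : List (Int × Int)) (acc : Option Int) :
    (blocks.any (fun b => decide (start_min < b.2) && decide (b.1 < c)) || pvThLt acc c)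
      = pvThLt (blocks.foldl (pvThStep start_min) acc) c := by
  induction blocks generalizing acc with
  | nil => simp
  | cons b rest ih =>
    have hstep : (decide (start_min < b.2) && decide (b.1 < c) || pvThLt acc c)
        = pvThLt (pvThStep start_min acc b) c := by
      cases acc with
      | none =>
        by_cases h : start_min < b.2 <;> simp [pvThStep, pvThLt, h]
      | some t =>
        by_cases h : start_min < b.2 <;> by_cases h2 : b.1 < t <;>
          simp [pvThStep, pvThLt, h, h2] <;> omega
    calc ((b :: rest).any (fun b => decide (start_min < b.2) && decide (b.1 < c)) || pvThLt acc c)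
        = (rest.any (fun b => decide (start_min < b.2) && decide (b.1 < c))
            || (decide (start_min < b.2) && decide (b.1 < c) || pvThLt acc c)) := by
          simp [List.any_cons, Bool.or_assoc, Bool.or_comm]
      _ = (rest.any (fun b => decide (start_min < b.2) && decide (b.1 < c))
            || pvThLt (pvThStep start_min acc b) c) := by rw [hstep]
      _ = pvThLt ((b :: rest).foldl (pvThStep start_min) acc) c := by
          rw [ih]; simp [List.foldl_cons]

-- Folding conditional Set.add over pairs with pairwise-distinct second components,
-- none already in the accumulator, appends exactly the filtered values.
lemma fold_add_eq_filter (cond : String → Bool) (vals : List (String × String))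
    (acc : List String) (hnd : (vals.map (·.2)).Nodup)
    (hdisj : ∀ p ∈ vals, p.2 ∉ acc) :
    vals.foldl (fun skip p => if cond p.2 then PySem.Set.add skip p.2 else skip) acc
      = acc ++ (vals.filter (fun p => cond p.2)).map (·.2) := by
  induction vals generalizing acc with
  | nil => simp
  | cons p rest ih =>
    simp only [List.map_cons, List.nodup_cons] at hnd
    by_cases hc : cond p.2 = true
    · have hadd : PySem.Set.add acc p.2 = acc ++ [p.2] := by
        simp only [PySem.Set.add]
        rw [if_neg]
        simpa [PySem.Set.contains_iff] using hdisj p List.mem_cons_self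
      rw [List.foldl_cons, if_pos hc, hadd,
        ih (acc ++ [p.2]) hnd.2 (by
          intro q hq
          simp only [List.mem_append, List.mem_singleton]
          rintro (h | h)
          · exact hdisj q (List.mem_cons_of_mem _ hq) h
          · exact hnd.1 (h ▸ List.mem_map_of_mem hq))]
      simp [hc]
    · rw [List.foldl_cons, if_neg hc,
        ih acc hnd.2 (fun q hq => hdisj q (List.mem_cons_of_mem _ hq))]
      simp [hc]

lemma bday_snd_nodup : (pvBdayTimes.map (·.2)).Nodup := by decide

-- ===== VERDICT (by name: the statement is the Claim_ definition above) =====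
theorem calc_blocked_end_times_spec : Claim_equal_calc_blocked_end_times := by
  intro start_min blocks cleanup _
  unfold Spec_calc_blocked_end_times calc_blocked_end_times calc_blocked_end_times_alt
  have hcond : ∀ p : String × String,
      blocks.any (fun b => decide (start_min < b.2) && decide (b.1 < pvEMin p.2 + cleanup))
        = pvThLt (blocks.foldl (pvThStep start_min) none) (pvEMin p.2 + cleanup) := by
    intro p
    have := any_eq_thLt start_min (pvEMin p.2 + cleanup) blocks none
    simpa [pvThLt] using this
  have hfun :
      (fun (skip : List String) (p : String × String) =>
          let e_min := pvEMin p.2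
          if blocks.any (fun b => decide (start_min < b.2) && decide (b.1 < e_min + cleanup)) then
            PySem.Set.add skip p.2
          else skip)
        = (fun skip p =>
            if pvThLt (blocks.foldl (pvThStep start_min) none) (pvEMin p.2 + cleanup) then
              PySem.Set.add skip p.2
            else skip) := by
    funext skip p; simp only [hcond p]
  rw [hfun,
    fold_add_eq_filter (fun v => pvThLt (blocks.foldl (pvThStep start_min) none) (pvEMin v + cleanup))
      pvBdayTimes PySem.Set.empty bday_snd_nodup (by intro p _ h; simp [PySem.Set.empty] at h)]
  rw [PySem.Set.ofList_eq_self_of_nodup]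
  · simp [PySem.Set.empty]
  · exact bday_snd_nodup.sublist (List.Sublist.map _ List.filter_sublist)
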